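-- pv_equiv track=rewrite | github.com/JhuoW/GraLSP_pytorch | utils.py | to_anonym_walk
-- ===== SOURCE A (Python) =====
-- def to_anonym_walk(walk):
--         num_app = 0
--         apped = dict()
--         anonym = []
--         for node in walk:
--             if node not in apped:
--                 num_app += 1
--                 apped[node] = num_app
--             anonym.append(apped[node])
--
--         return anonym
-- ===== SOURCE B (Python) =====
-- def to_anonym_walk(walk):
--     # Rank of a node = 1 + number of distinct nodes seen strictly before its
--     # first occurrence; computed per element from the walk itself, no mapping table.
--     return [len(set(walk[:walk.index(n)])) + 1 for n in walk]
-- ===== Notes on version B (the rewrite author's own statement) =====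
-- stated objective: alternative
-- what changed: Replaces A's fused stateful pass (counter + dict grown while appending) with a stateless per-element closed form: each node's label is 1 + the number of distinct nodes in the walk prefix before its first occurrence, computed with walk.index and a set over a slice, with no dict and no accumulator.
import Mathlib
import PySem

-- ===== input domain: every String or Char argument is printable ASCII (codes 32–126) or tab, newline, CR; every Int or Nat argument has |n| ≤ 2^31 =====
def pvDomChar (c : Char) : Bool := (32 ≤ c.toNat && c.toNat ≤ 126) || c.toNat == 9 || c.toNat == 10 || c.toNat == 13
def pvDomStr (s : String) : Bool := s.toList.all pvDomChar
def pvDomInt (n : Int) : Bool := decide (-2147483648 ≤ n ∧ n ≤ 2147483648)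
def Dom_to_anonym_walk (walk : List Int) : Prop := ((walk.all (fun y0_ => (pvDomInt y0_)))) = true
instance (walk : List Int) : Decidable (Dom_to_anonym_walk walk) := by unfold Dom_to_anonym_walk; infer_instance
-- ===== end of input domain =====

-- B replaces A's fused stateful pass (counter + dict grown while appending) with a stateless per-element
-- closed form: label(n) = 1 + number of distinct nodes before n's first occurrence; equal output, no speed claim.

-- ===== PORT A =====
-- A: one fold over the walk carrying (num_app, apped, anonym); fresh nodes get the next number.
def to_anonym_walk (walk : List Int) : List Int :=
  (walk.foldl
    (fun (st : Int × PySem.Dict Int Int × List Int) node =>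
      let num_app := st.1
      let apped := st.2.1
      let anonym := st.2.2
      -- 'if node not in apped: num_app += 1; apped[node] = num_app'
      let st' : Int × PySem.Dict Int Int :=
        if apped.contains node = false then (num_app + 1, apped.insert node (num_app + 1))
        else (num_app, apped)
      -- 'anonym.append(apped[node])' — node is in apped here, so the getD default 0 is never used
      (st'.1, st'.2, anonym ++ [st'.2.getD node 0]))
    (0, PySem.Dict.empty, [])).2.2

-- ===== PORT B =====
-- B: [len(set(walk[:walk.index(n)])) + 1 for n in walk]
def to_anonym_walk_alt (walk : List Int) : List Int :=
  walk.map (fun n =>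
    match PySem.List.index? walk n with
    | some i => ((PySem.Set.ofList (PySem.List.slice walk none (some (i : Int)))).length : Int) + 1
    | none => 0)  -- unreachable: n is drawn from walk, so walk.index(n) never raises

-- ===== PRECONDITION & SPEC =====
def Spec_to_anonym_walk (walk : List Int) (out : List Int) : Prop := out = to_anonym_walk_alt walk
instance (walk : List Int) (out : List Int) : Decidable (Spec_to_anonym_walk walk out) := by unfold Spec_to_anonym_walk; infer_instance

-- ===== CLAIM (what is proved, stated in full; the proofs are below) =====
def Claim_equal_to_anonym_walk : Prop := ∀ (walk : List Int), Dom_to_anonym_walk walk → Spec_to_anonym_walk walk (to_anonym_walk walk)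

-- ===== LEMMAS AND PROOFS =====

-- the final set of distinct nodes when the loop starts having already seen `u`
def seenAfter (u rest : List Int) : List Int := rest.foldl PySem.Set.add u

lemma seenAfter_prefix (rest : List Int) : ∀ u : List Int, ∃ s, seenAfter u rest = u ++ s := by
  induction rest with
  | nil => intro u; exact ⟨[], by simp [seenAfter]⟩
  | cons n t ih =>
    intro u
    simp only [seenAfter, List.foldl_cons, PySem.Set.add]
    by_cases h : n ∈ u
    · simpa [List.contains_eq_mem, h] using ih u
    · obtain ⟨s, hs⟩ := ih (u ++ [n])
      exact ⟨n :: s, by simpa [List.contains_eq_mem, h] using hs⟩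

lemma idxOf_seenAfter (rest u : List Int) (n : Int) (h : n ∈ u) :
    List.idxOf n (seenAfter u rest) = List.idxOf n u := by
  obtain ⟨s, hs⟩ := seenAfter_prefix rest u
  rw [hs, List.idxOf_append, if_pos (by simpa using h)]

-- A's loop invariant: with the dict holding exactly the first-appearance ranks of `u`,
-- the fold appends the ranks (relative to the final distinct list) of `rest`.
lemma A_loop (rest : List Int) : ∀ (u acc : List Int) (d : PySem.Dict Int Int),
    (∀ m, d.contains m = u.contains m) →
    (∀ m, m ∈ u → d.getD m 0 = (List.idxOf m u : Int) + 1) →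
    (rest.foldl
      (fun (st : Int × PySem.Dict Int Int × List Int) node =>
        let num_app := st.1
        let apped := st.2.1
        let anonym := st.2.2
        let st' : Int × PySem.Dict Int Int :=
          if apped.contains node = false then (num_app + 1, apped.insert node (num_app + 1))
          else (num_app, apped)
        (st'.1, st'.2, anonym ++ [st'.2.getD node 0]))
      ((u.length : Int), d, acc)).2.2
      = acc ++ rest.map (fun n => (List.idxOf n (seenAfter u rest) : Int) + 1) := by
  induction rest with
  | nil => intro u acc d _ _; simp [seenAfter]
  | cons n t ih =>
    intro u acc d hc hg
    simp only [List.foldl_cons, List.map_cons]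
    by_cases h : u.contains n = true
    · have hmem : n ∈ u := by simpa using h
      have hd : d.contains n = true := by rw [hc]; exact h
      have hsa : seenAfter u (n :: t) = seenAfter u t := by
        simp [seenAfter, PySem.Set.add, List.contains_eq_mem, hmem]
      rw [hsa]
      simp only [hd, Bool.true_eq_false, if_false]
      rw [ih u (acc ++ [d.getD n 0]) d hc hg]
      rw [hg n hmem, idxOf_seenAfter t u n hmem]
      simp
    · have hmem : n ∉ u := by simpa using h
      have hd : d.contains n = false := by rw [hc]; simpa using h
      have hsa : seenAfter u (n :: t) = seenAfter (u ++ [n]) t := by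
        simp [seenAfter, PySem.Set.add, List.contains_eq_mem, hmem]
      rw [hsa]
      simp only [hd, if_true]
      have hlen : (u.length : Int) + 1 = (((u ++ [n]).length : Nat) : Int) := by simp
      rw [hlen]
      have hc' : ∀ m, (d.insert n (((u ++ [n]).length : Nat) : Int)).contains m
          = (u ++ [n]).contains m := by
        intro m
        rw [PySem.Dict.contains_insert]
        by_cases hm : m = n
        · simp [hm]
        · simp [hc m, hm, List.contains_eq_mem]
      have hg' : ∀ m, m ∈ u ++ [n] →
          (d.insert n (((u ++ [n]).length : Nat) : Int)).getD m 0
            = (List.idxOf m (u ++ [n]) : Int) + 1 := by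
        intro m hm
        by_cases hmn : m = n
        · subst hmn
          rw [PySem.Dict.getD_insert_self, List.idxOf_append, if_neg (by simpa using hmem)]
          simp
        · have hmu : m ∈ u := by
            rcases List.mem_append.mp hm with h' | h'
            · exact h'
            · exact absurd (List.mem_singleton.mp h') hmn
          rw [PySem.Dict.getD_insert_of_ne _ _ _ hmn, hg m hmu,
            List.idxOf_append, if_pos (by simpa using hmu)]
      rw [ih (u ++ [n]) _ _ hc' hg']
      have hidx : List.idxOf n (seenAfter (u ++ [n]) t) = u.length := by
        rw [idxOf_seenAfter t (u ++ [n]) n (by simp),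
          List.idxOf_append, if_neg (by simpa using hmem)]
        simp
      rw [PySem.Dict.getD_insert_self, hidx]
      simp

-- B's closed form: the rank of n in the final distinct list equals the number of distinct
-- elements of the prefix strictly before n's first occurrence.
lemma idx_dedup_eq (walk : List Int) : ∀ (u : List Int) (n : Int), n ∈ walk → n ∉ u →
    List.idxOf n (seenAfter u walk) = (seenAfter u (walk.take (List.idxOf n walk))).length := by
  induction walk with
  | nil => intro u n h _; exact absurd h (List.not_mem_nil)
  | cons m t ih =>
    intro u n hmem hnu
    by_cases hnm : n = m
    · subst hnm
      rw [List.idxOf_cons_self, List.take_zero]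
      have hadd : PySem.Set.add u n = u ++ [n] := by
        simp [PySem.Set.add, List.contains_eq_mem, hnu]
      simp only [seenAfter, List.foldl_cons, List.foldl_nil, hadd]
      have := idxOf_seenAfter t (u ++ [n]) n (by simp)
      simp only [seenAfter] at this
      rw [this, List.idxOf_append, if_neg (by simpa using hnu)]
      simp
    · have hnt : n ∈ t := by
        rcases List.mem_cons.mp hmem with h' | h'
        · exact absurd h' hnm
        · exact h'
      have hnu' : n ∉ PySem.Set.add u m := by
        simp only [PySem.Set.add]
        split
        · exact hnu
        · simp [hnm, hnu]
      have hidx : List.idxOf n (m :: t) = List.idxOf n t + 1 :=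
        List.idxOf_cons_ne t (fun h => hnm h.symm)
      rw [hidx, List.take_succ_cons]
      simp only [seenAfter, List.foldl_cons]
      exact ih (PySem.Set.add u m) n hnt hnu'

lemma index?_of_mem (l : List Int) (n : Int) (h : n ∈ l) :
    PySem.List.index? l n = some (List.idxOf n l) := by
  rw [PySem.List.index?_eq_idxOf?]
  induction l with
  | nil => simp at h
  | cons m t ih =>
    by_cases hm : m = n
    · subst hm; simp [List.idxOf?_cons, List.idxOf_cons_self]
    · have hnt : n ∈ t := (List.mem_cons.mp h).resolve_left (fun h' => hm h'.symm)
      rw [List.idxOf?_cons]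
      simp only [beq_iff_eq, hm, if_false, ih hnt]
      rw [List.idxOf_cons_ne _ hm]
      rfl

-- ===== VERDICT (by name: the statement is the Claim_ definition above) =====
theorem to_anonym_walk_spec : Claim_equal_to_anonym_walk := by
  intro walk _
  unfold Spec_to_anonym_walk to_anonym_walk to_anonym_walk_alt
  have hA := A_loop walk [] [] PySem.Dict.empty
    (by intro m; simp [PySem.Dict.contains_empty])
    (by intro m hm; simp at hm)
  simp only [List.length_nil, Nat.cast_zero] at hA
  rw [hA]
  simp only [List.nil_append]
  apply List.map_congr_left
  intro n hn
  have hidx? : PySem.List.index? walk n = some (List.idxOf n walk) :=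
    index?_of_mem walk n hn
  rw [hidx?]
  simp only []
  rw [PySem.List.slice_to_natCast]
  rw [show PySem.Set.ofList (walk.take (List.idxOf n walk))
        = seenAfter [] (walk.take (List.idxOf n walk)) from rfl]
  rw [idx_dedup_eq walk [] n hn (List.not_mem_nil)]
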